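-- pv_equiv track=rewrite | github.com/Sinan53x/parfume-recommender | app/infrastructure/scraping/parsers/product_parser.py | _extract_raw_notes
-- ===== SOURCE A (Python) =====
-- _LABELS = {
--     "notes_top": ("top notes", "head notes", "kopfnote", "kopfnoten"),
--     "notes_middle": ("middle notes", "heart notes", "herznote", "herznoten"),
--     "notes_base": ("base notes", "basisnote", "basisnoten"),
-- }
--
-- def _extract_raw_notes(lines: tuple[str, ...]) -> dict[str, list[str]]:
--     notes = {"notes_top": [], "notes_middle": [], "notes_base": []}
--
--     for key, labels in _LABELS.items():
--         for index, line in enumerate(lines):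
--             lowered = line.casefold()
--             if not any(label in lowered for label in labels):
--                 continue
--
--             inline = _value_after_colon(line)
--             if inline:
--                 notes[key].append(inline)
--             notes[key].extend(_collect_following_lines(lines, index))
--
--     return notes
--
-- def _collect_following_lines(lines: tuple[str, ...], index: int) -> list[str]:
--     collected: list[str] = []
--
--     for next_line in lines[index + 1 : index + 4]:
--         lowered = next_line.casefold()
--         if any(label in lowered for labels in _LABELS.values() for label in labels):
--             break
--         if any(
--             marker in lowered
--             for marker in ("duftfamilie", "geschlecht", "molekül", "molecule", "family")
--         ):
--             break
--         if _looks_like_note_line(next_line):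
--             collected.append(next_line)
--
--     return collected
--
-- def _value_after_colon(value: str) -> str:
--     if ":" not in value:
--         return ""
--     return value.split(":", maxsplit=1)[1].strip()
--
-- def _looks_like_note_line(value: str) -> bool:
--     if len(value) > 35 or "." in value:
--         return False
--     words = [token for token in value.split(" ") if token]
--     return 0 < len(words) <= 4
-- ===== SOURCE B (Python) =====
-- _LABELS = {
--     "notes_top": ("top notes", "head notes", "kopfnote", "kopfnoten"),
--     "notes_middle": ("middle notes", "heart notes", "herznote", "herznoten"),
--     "notes_base": ("base notes", "basisnote", "basisnoten"),
-- }
--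
-- _MARKERS = ("duftfamilie", "geschlecht", "molekül", "molecule", "family")
--
--
-- def _note_shaped(value):
--     if len(value) > 35 or "." in value:
--         return False
--     return 0 < len([token for token in value.split(" ") if token]) <= 4
--
--
-- def _contribution(line, window):
--     out = []
--     if ":" in line:
--         inline = line.split(":", 1)[1].strip()
--         if inline:
--             out.append(inline)
--     for nxt in window:
--         low = nxt.casefold()
--         if any(label in low for labels in _LABELS.values() for label in labels) or any(
--             marker in low for marker in _MARKERS
--         ):
--             break
--         if _note_shaped(nxt):
--             out.append(nxt)
--     return out
--
--
-- def _extract_raw_notes(lines):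
--     buckets = {"notes_top": [], "notes_middle": [], "notes_base": []}
--     window = []  # the (at most three) lines that follow the current one
--     for line in reversed(lines):
--         lowered = line.casefold()
--         matched = [key for key, labels in _LABELS.items()
--                    if any(label in lowered for label in labels)]
--         if matched:
--             contribution = _contribution(line, window)
--             for key in matched:
--                 buckets[key] = contribution + buckets[key]
--         window = [line] + window[:2]
--     return buckets
-- ===== Notes on version B (the rewrite author's own statement) =====
-- stated objective: simpler
-- what changed: B replaces A's three forward scans with enumerate and index-slice lookahead by a single backward pass over the lines that carries a sliding window of the at-most-three following lines and prepends each matching line's contribution (computed once, shared by all matched categories) to its buckets; no indices or slices remain.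
import Mathlib
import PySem

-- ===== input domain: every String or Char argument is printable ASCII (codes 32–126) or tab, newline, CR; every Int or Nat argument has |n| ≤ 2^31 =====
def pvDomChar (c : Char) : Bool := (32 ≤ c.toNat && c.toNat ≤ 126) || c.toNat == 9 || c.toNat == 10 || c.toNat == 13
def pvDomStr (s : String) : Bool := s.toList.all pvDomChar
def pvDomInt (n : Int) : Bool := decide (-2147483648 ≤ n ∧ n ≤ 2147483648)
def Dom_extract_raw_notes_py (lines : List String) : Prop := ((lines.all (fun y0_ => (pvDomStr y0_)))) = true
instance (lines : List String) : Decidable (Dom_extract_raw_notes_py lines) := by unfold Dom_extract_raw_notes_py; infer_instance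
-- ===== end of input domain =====

-- B replaces A's three index-based forward scans (enumerate + slicing lookahead) by ONE
-- backward pass over the lines that maintains a ≤3-line sliding window of the following
-- lines and PREPENDS each matching line's contribution; objective 'simpler'.
-- (On the ASCII input domain str.casefold coincides with str.lower, ported as PySem.Str.lower.)

-- ===== PORT A =====
-- shared module constants (_LABELS, the marker tuple)
def pvLabels : List (String × List String) :=
  [("notes_top", ["top notes", "head notes", "kopfnote", "kopfnoten"]),
   ("notes_middle", ["middle notes", "heart notes", "herznote", "herznoten"]),
   ("notes_base", ["base notes", "basisnote", "basisnoten"])]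

def pvMarkers : List String := ["duftfamilie", "geschlecht", "molekül", "molecule", "family"]

-- _value_after_colon
def pvValueAfterColon (value : String) : String :=
  if PySem.Str.isIn ":" value = false then ""
  else
    match PySem.Str.splitMax? value ":" 1 with
    | some (_ :: rest :: _) => PySem.Str.strip rest
    | _ => ""  -- unreachable: a split on a contained non-empty separator yields ≥ 2 parts

-- _looks_like_note_line
def pvLooksLikeNoteLine (value : String) : Bool :=
  if 35 < PySem.Str.len value || PySem.Str.isIn "." value then false
  else
    let words := ((PySem.Str.split? value " ").getD []).filter (fun token => token ≠ "")
    decide (0 < words.length) && decide (words.length ≤ 4)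

-- _collect_following_lines: the for-loop with two breaks, as structural recursion
def pvCollectGo : List String → List String
  | [] => []
  | next_line :: rest =>
    let lowered := PySem.Str.lower next_line
    if pvLabels.any (fun kl => kl.2.any (fun label => PySem.Str.isIn label lowered)) then []
    else if pvMarkers.any (fun marker => PySem.Str.isIn marker lowered) then []
    else if pvLooksLikeNoteLine next_line then next_line :: pvCollectGo rest
    else pvCollectGo rest

def pvCollectFollowingLines (lines : List String) (index : Int) : List String :=
  pvCollectGo (PySem.List.slice lines (some (index + 1)) (some (index + 4)))

def extract_raw_notes_py (lines : List String) : List (String × List String) :=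
  let notes : PySem.Dict String (List String) :=
    PySem.Dict.mk [("notes_top", []), ("notes_middle", []), ("notes_base", [])]
  (pvLabels.foldl (fun notes kl =>
    (PySem.List.enumerate lines 0).foldl (fun notes il =>
      let index := il.1
      let line := il.2
      let lowered := PySem.Str.lower line
      if !(kl.2.any (fun label => PySem.Str.isIn label lowered)) then notes
      else
        let inline := pvValueAfterColon line
        let notes := if inline ≠ "" then notes.modify kl.1 [] (· ++ [inline]) else notes
        notes.modify kl.1 [] (· ++ pvCollectFollowingLines lines index))
      notes)
    notes).items

-- ===== PORT B =====
-- _note_shaped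
def pvNoteShaped (value : String) : Bool :=
  if 35 < PySem.Str.len value || PySem.Str.isIn "." value then false
  else
    let count := (((PySem.Str.split? value " ").getD []).filter (fun token => token ≠ "")).length
    decide (0 < count) && decide (count ≤ 4)

-- the window loop of _contribution (for … in window with break), as structural recursion
def pvContributionGo : List String → List String
  | [] => []
  | nxt :: rest =>
    let low := PySem.Str.lower nxt
    if pvLabels.any (fun kl => kl.2.any (fun label => PySem.Str.isIn label low))
        || pvMarkers.any (fun marker => PySem.Str.isIn marker low) then []
    else if pvNoteShaped nxt then nxt :: pvContributionGo rest
    else pvContributionGo rest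

-- _contribution: the out list is the optional inline part followed by the window-loop part
def pvContribution (line : String) (window : List String) : List String :=
  (if PySem.Str.isIn ":" line then
    let inline :=
      match PySem.Str.splitMax? line ":" 1 with
      | some (_ :: rest :: _) => PySem.Str.strip rest
      | _ => ""  -- unreachable, as in port A
    if inline ≠ "" then [inline] else []
  else []) ++ pvContributionGo window

-- single backward pass: state = (buckets, window of the ≤3 following lines)
def extract_raw_notes_py_alt (lines : List String) : List (String × List String) :=
  let buckets : PySem.Dict String (List String) :=
    PySem.Dict.mk [("notes_top", []), ("notes_middle", []), ("notes_base", [])]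
  ((lines.reverse.foldl (fun st line =>
      let window := st.2
      let lowered := PySem.Str.lower line
      let matched := pvLabels.filterMap (fun kl =>
        if kl.2.any (fun label => PySem.Str.isIn label lowered) then some kl.1 else none)
      let bu :=
        if matched.isEmpty then st.1
        else
          let contribution := pvContribution line window
          matched.foldl (fun bu key => bu.modify key [] (fun cur => contribution ++ cur)) st.1
      (bu, line :: PySem.List.slice window none (some 2)))
    (buckets, ([] : List String))).1).items

-- ===== PRECONDITION & SPEC =====
def Spec_extract_raw_notes_py (lines : List String) (out : List (String × List String)) : Prop := out = extract_raw_notes_py_alt lines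
instance (lines : List String) (out : List (String × List String)) : Decidable (Spec_extract_raw_notes_py lines out) := by unfold Spec_extract_raw_notes_py; infer_instance

-- ===== CLAIM (what is proved, stated in full; the proofs are below) =====
def Claim_equal_extract_raw_notes_py : Prop := ∀ (lines : List String), Dom_extract_raw_notes_py lines → Spec_extract_raw_notes_py lines (extract_raw_notes_py lines)

-- ===== LEMMAS AND PROOFS =====

-- the fixed three-slot dict both programs maintain
def pvMk3 (a b c : List String) : PySem.Dict String (List String) :=
  PySem.Dict.mk [("notes_top", a), ("notes_middle", b), ("notes_base", c)]

theorem pvMk3_modify_top (a b c : List String) (f : List String → List String) :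
    (pvMk3 a b c).modify "notes_top" [] f = pvMk3 (f a) b c := rfl

theorem pvMk3_modify_middle (a b c : List String) (f : List String → List String) :
    (pvMk3 a b c).modify "notes_middle" [] f = pvMk3 a (f b) c := rfl

theorem pvMk3_modify_base (a b c : List String) (f : List String → List String) :
    (pvMk3 a b c).modify "notes_base" [] f = pvMk3 a b (f c) := rfl

-- does `line` match category kl?
def pvMatch (kl : String × List String) (line : String) : Bool :=
  kl.2.any (fun label => PySem.Str.isIn label (PySem.Str.lower line))

-- A's per-line contribution to a matching category (absolute index form)
def pvContribA (lines : List String) (index : Int) (line : String) : List String :=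
  (if pvValueAfterColon line ≠ "" then [pvValueAfterColon line] else [])
    ++ pvCollectFollowingLines lines index

def pvF (kl : String × List String) (lines : List String) (il : Int × String) : List String :=
  if pvMatch kl il.2 then pvContribA lines il.1 il.2 else []

-- the same contribution, index-free: the lookahead is the first three following lines
def pvContribR (line : String) (rest : List String) : List String :=
  (if pvValueAfterColon line ≠ "" then [pvValueAfterColon line] else [])
    ++ pvCollectGo (rest.take 3)

-- the common per-category closed form both ports are reduced to
def pvG (kl : String × List String) : List String → List String
  | [] => []
  | line :: rest => (if pvMatch kl line then pvContribR line rest else []) ++ pvG kl rest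

-- A's inner loop for one category appends that category's flatMap
theorem pvA_inner (key : String) (labels : List String) (lines : List String)
    (hk : key = "notes_top" ∨ key = "notes_middle" ∨ key = "notes_base") :
    ∀ (e : List (Int × String)) (a b c : List String),
    e.foldl (fun notes il =>
      if (!(labels.any (fun label => PySem.Str.isIn label (PySem.Str.lower il.2)))) = true then notes
      else
        (if pvValueAfterColon il.2 ≠ "" then notes.modify key [] (· ++ [pvValueAfterColon il.2])
         else notes).modify key [] (· ++ pvCollectFollowingLines lines il.1)) (pvMk3 a b c)
      = (pvMk3 a b c).modify key [] (· ++ e.flatMap (pvF (key, labels) lines)) := by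
  intro e
  induction e with
  | nil =>
    intro a b c
    rcases hk with h | h | h <;>
      simp [h, pvMk3_modify_top, pvMk3_modify_middle, pvMk3_modify_base]
  | cons il rest ih =>
    intro a b c
    simp only [List.foldl_cons, List.flatMap_cons]
    rcases hk with h | h | h <;>
    · subst h
      by_cases hm : (labels.any (fun label => PySem.Str.isIn label (PySem.Str.lower il.2))) = true
      · simp only [hm, Bool.not_true, Bool.false_eq_true, if_false]
        by_cases hi : pvValueAfterColon il.2 ≠ ""
        · rw [if_pos hi]
          simp only [pvMk3_modify_top, pvMk3_modify_middle, pvMk3_modify_base]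
          rw [ih]
          simp only [pvF, pvMatch, pvContribA]
          rw [if_pos hm, if_pos hi]
          simp [pvMk3_modify_top, pvMk3_modify_middle, pvMk3_modify_base, List.append_assoc]
        · rw [if_neg hi]
          simp only [pvMk3_modify_top, pvMk3_modify_middle, pvMk3_modify_base]
          rw [ih]
          simp only [pvF, pvMatch, pvContribA]
          rw [if_pos hm, if_neg hi]
          simp [pvMk3_modify_top, pvMk3_modify_middle, pvMk3_modify_base, List.append_assoc]
      · rw [Bool.not_eq_true] at hm
        simp only [hm, Bool.not_false, if_true]
        rw [ih]
        simp only [pvF, pvMatch]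
        rw [if_neg (by simpa using hm)]
        simp [pvMk3_modify_top, pvMk3_modify_middle, pvMk3_modify_base]

-- closed form of port A, absolute-index version
theorem pvA_closed (lines : List String) :
    extract_raw_notes_py lines
      = (pvMk3 ((PySem.List.enumerate lines 0).flatMap (pvF ("notes_top", ["top notes", "head notes", "kopfnote", "kopfnoten"]) lines))
               ((PySem.List.enumerate lines 0).flatMap (pvF ("notes_middle", ["middle notes", "heart notes", "herznote", "herznoten"]) lines))
               ((PySem.List.enumerate lines 0).flatMap (pvF ("notes_base", ["base notes", "basisnote", "basisnoten"]) lines))).items := by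
  show (pvLabels.foldl _ (pvMk3 [] [] [])).items = _
  simp only [pvLabels, List.foldl_cons, List.foldl_nil]
  rw [pvA_inner _ _ lines (Or.inl rfl) _ [] [] [], pvMk3_modify_top]
  rw [pvA_inner _ _ lines (Or.inr (Or.inl rfl)) _ _ _ _, pvMk3_modify_middle]
  rw [pvA_inner _ _ lines (Or.inr (Or.inr rfl)) _ _ _ _, pvMk3_modify_base]
  simp

-- the absolute-index flatMap is the index-free pvG
theorem pvF_abs_rel (kl : String × List String) :
    ∀ (cur pre : List String),
      (PySem.List.enumerate cur ((pre.length : Nat) : Int)).flatMap (pvF kl (pre ++ cur)) = pvG kl cur := by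
  intro cur
  induction cur with
  | nil => intro pre; simp [pvG]
  | cons line rest ih =>
    intro pre
    rw [PySem.List.enumerate_cons, List.flatMap_cons]
    have hdrop : PySem.List.slice (pre ++ line :: rest)
        (some (((pre.length : Nat) : Int) + 1)) (some (((pre.length : Nat) : Int) + 4)) = rest.take 3 := by
      have h1 : (((pre.length : Nat) : Int) + 1) = (((pre.length + 1 : Nat)) : Int) := by push_cast; ring
      have h4 : (((pre.length : Nat) : Int) + 4) = (((pre.length + 4 : Nat)) : Int) := by push_cast; ring
      rw [h1, h4, PySem.List.slice_natCast]
      have hsplit : pre ++ line :: rest = (pre ++ [line]) ++ rest := by simp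
      have hlen : pre.length + 1 = (pre ++ [line]).length := by simp
      rw [hsplit, hlen, List.drop_left]
      congr 1
      omega
    have hhead : pvF kl (pre ++ line :: rest) (((pre.length : Nat) : Int), line)
        = if pvMatch kl line then pvContribR line rest else [] := by
      simp only [pvF, pvContribA, pvContribR, pvCollectFollowingLines]
      rw [hdrop]
    have htail : (PySem.List.enumerate rest (((pre.length : Nat) : Int) + 1)).flatMap
        (pvF kl (pre ++ line :: rest)) = pvG kl rest := by
      have h1 : (((pre.length : Nat) : Int) + 1) = (((pre ++ [line]).length : Nat) : Int) := by
        simp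
      have h2 : pre ++ line :: rest = (pre ++ [line]) ++ rest := by simp
      rw [h1, h2, ih (pre ++ [line])]
    rw [hhead, htail]
    rfl

-- closed form of port A, index-free
theorem pvA_rel (lines : List String) :
    extract_raw_notes_py lines
      = (pvMk3 (pvG ("notes_top", ["top notes", "head notes", "kopfnote", "kopfnoten"]) lines)
               (pvG ("notes_middle", ["middle notes", "heart notes", "herznote", "herznoten"]) lines)
               (pvG ("notes_base", ["base notes", "basisnote", "basisnoten"]) lines)).items := by
  rw [pvA_closed]
  have h : ∀ kl : String × List String,
      (PySem.List.enumerate lines 0).flatMap (pvF kl lines) = pvG kl lines := by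
    intro kl
    have := pvF_abs_rel kl lines []
    simpa using this
  rw [h, h, h]

-- B's _note_shaped is A's _looks_like_note_line
theorem pvNoteShaped_eq (value : String) : pvNoteShaped value = pvLooksLikeNoteLine value := rfl

-- B's window loop is A's fused collect loop
theorem pvContributionGo_eq (xs : List String) : pvContributionGo xs = pvCollectGo xs := by
  induction xs with
  | nil => rfl
  | cons n rest ih =>
    unfold pvContributionGo pvCollectGo
    simp only [pvNoteShaped_eq, ih]
    by_cases h1 : (pvLabels.any (fun kl => kl.2.any (fun label => PySem.Str.isIn label (PySem.Str.lower n)))) = true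
    · simp only [h1, Bool.true_or, if_true]
    · simp only [Bool.not_eq_true] at h1
      simp only [h1, Bool.false_or, Bool.false_eq_true, if_false]

-- B's inline-candidate list is A's
theorem pvInline_eq (line : String) :
    (if PySem.Str.isIn ":" line then
      (let inline :=
        match PySem.Str.splitMax? line ":" 1 with
        | some (_ :: rest :: _) => PySem.Str.strip rest
        | _ => ""
      if inline ≠ "" then [inline] else [])
    else ([] : List String))
      = (if pvValueAfterColon line ≠ "" then [pvValueAfterColon line] else []) := by
  unfold pvValueAfterColon
  by_cases h : PySem.Str.isIn ":" line = true
  · simp only [h, if_true, Bool.true_eq_false, if_false]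
  · have h' : PySem.Chars.isIn [':'] line.toList = false := by simpa using h
    simp [h']

-- _contribution on the 3-window is the index-free contribution
theorem pvContribution_eq (line : String) (rest : List String) :
    pvContribution line (rest.take 3) = pvContribR line rest := by
  unfold pvContribution pvContribR
  rw [pvContributionGo_eq, pvInline_eq]

-- one step of B's backward fold on the three-slot dict
theorem pvB_line (a b c : List String) (line : String) (window : List String) :
    (let lowered := PySem.Str.lower line
     let matched := pvLabels.filterMap (fun kl =>
       if kl.2.any (fun label => PySem.Str.isIn label lowered) then some kl.1 else none)
     if matched.isEmpty then pvMk3 a b c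
     else
       let contribution := pvContribution line window
       matched.foldl (fun bu key => bu.modify key [] (fun cur => contribution ++ cur)) (pvMk3 a b c))
      = pvMk3 ((if pvMatch ("notes_top", ["top notes", "head notes", "kopfnote", "kopfnoten"]) line then pvContribution line window else []) ++ a)
              ((if pvMatch ("notes_middle", ["middle notes", "heart notes", "herznote", "herznoten"]) line then pvContribution line window else []) ++ b)
              ((if pvMatch ("notes_base", ["base notes", "basisnote", "basisnoten"]) line then pvContribution line window else []) ++ c) := by
  simp only [pvLabels, List.filterMap_cons, List.filterMap_nil]
  by_cases h1 : pvMatch ("notes_top", ["top notes", "head notes", "kopfnote", "kopfnoten"]) line <;>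
  by_cases h2 : pvMatch ("notes_middle", ["middle notes", "heart notes", "herznote", "herznoten"]) line <;>
  by_cases h3 : pvMatch ("notes_base", ["base notes", "basisnote", "basisnoten"]) line <;>
  · have e1 := h1; have e2 := h2; have e3 := h3
    simp only [pvMatch] at e1 e2 e3
    simp only [e1, e2, e3] at *
    simp only [h1, h2, h3, if_true,
      List.isEmpty_cons, List.foldl_cons, List.foldl_nil,
      pvMk3_modify_top, pvMk3_modify_middle, pvMk3_modify_base]
    rfl

-- the whole backward fold, as a foldr, computes (closed form, 3-window)
theorem pvB_foldr :
    ∀ (cur : List String),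
    cur.foldr (fun line st =>
      (let window := st.2
       let lowered := PySem.Str.lower line
       let matched := pvLabels.filterMap (fun kl =>
         if kl.2.any (fun label => PySem.Str.isIn label lowered) then some kl.1 else none)
       let bu :=
         if matched.isEmpty then st.1
         else
           let contribution := pvContribution line window
           matched.foldl (fun bu key => bu.modify key [] (fun cur => contribution ++ cur)) st.1
       (bu, line :: PySem.List.slice window none (some 2))))
      (pvMk3 [] [] [], ([] : List String))
      = (pvMk3 (pvG ("notes_top", ["top notes", "head notes", "kopfnote", "kopfnoten"]) cur)
               (pvG ("notes_middle", ["middle notes", "heart notes", "herznote", "herznoten"]) cur)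
               (pvG ("notes_base", ["base notes", "basisnote", "basisnoten"]) cur),
         cur.take 3) := by
  intro cur
  induction cur with
  | nil => simp [pvG]
  | cons line rest ih =>
    rw [List.foldr_cons, ih]
    have hwin : PySem.List.slice (rest.take 3) none (some 2) = rest.take 2 := by
      simp [pysem, List.take_take]
    refine Prod.ext ?_ ?_
    · show (let lowered := PySem.Str.lower line
            let matched := pvLabels.filterMap (fun kl =>
              if kl.2.any (fun label => PySem.Str.isIn label lowered) then some kl.1 else none)
            if matched.isEmpty then _ else _) = _
      rw [pvB_line]
      simp only [pvContribution_eq]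
      rfl
    · show line :: PySem.List.slice (rest.take 3) none (some 2) = (line :: rest).take 3
      rw [hwin]
      rfl

-- closed form of port B (same as A's)
theorem pvB_closed (lines : List String) :
    extract_raw_notes_py_alt lines
      = (pvMk3 (pvG ("notes_top", ["top notes", "head notes", "kopfnote", "kopfnoten"]) lines)
               (pvG ("notes_middle", ["middle notes", "heart notes", "herznote", "herznoten"]) lines)
               (pvG ("notes_base", ["base notes", "basisnote", "basisnoten"]) lines)).items := by
  show ((lines.reverse.foldl _ (pvMk3 [] [] [], ([] : List String))).1).items = _
  rw [List.foldl_reverse]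
  rw [pvB_foldr lines]

-- ===== VERDICT (by name: the statement is the Claim_ definition above) =====
theorem extract_raw_notes_py_spec : Claim_equal_extract_raw_notes_py := by
  intro lines _
  show extract_raw_notes_py lines = extract_raw_notes_py_alt lines
  rw [pvA_rel, pvB_closed]
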